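-- pv_equiv track=rewrite | github.com/karimlasri/extraction_SR | src/extraction/get_tables/utils.py | new_find_intervals_max_positions
-- ===== SOURCE A (Python) =====
-- def new_find_intervals_max_positions(data, threshold=1):
--     """
--     Finds intervals between each pair of indices where the significant values occur in the list.
--     Significant values are those that are greater than or equal to the specified threshold.
--
--     Parameters:
--     data (list): The list to analyze.
--     threshold (int, optional): The threshold to determine significant values. Defaults to 1.
--
--     Returns:
--     list: A list of intervals between each pair of indices where significant values occur.
--     """
--     # Find all indices where the values are greater than or equal to the threshold
--     significant_positions = [
--         index for index, value in enumerate(data) if value >= threshold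
--     ]
--
--     # Create intervals between each pair of significant positions and ensure all indices are covered
--     intervals = []
--     if significant_positions:
--         # Add interval from start to first significant position
--         if significant_positions[0] > 0:
--             intervals.append(list(range(0, significant_positions[0])))
--
--         # Add intervals between each pair of significant positions
--         for i in range(len(significant_positions) - 1):
--             intervals.append(
--                 list(range(significant_positions[i], significant_positions[i + 1]))
--             )
--
--         # Add interval from last significant position to end
--         intervals.append(list(range(significant_positions[-1], len(data))))
--
--     return intervals
-- ===== SOURCE B (Python) =====
-- def new_find_intervals_max_positions(data, threshold=1):
--     intervals = []
--     cur = []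
--     seen = False
--     for i, value in enumerate(data):
--         if value >= threshold:
--             if cur:
--                 intervals.append(cur)
--             cur = []
--             seen = True
--         cur.append(i)
--     if not seen:
--         return []
--     intervals.append(cur)
--     return intervals
-- ===== Notes on version B (the rewrite author's own statement) =====
-- stated objective: simpler
-- what changed: Replaces A's two-phase approach (collect all significant indices, then assemble leading/between/trailing blocks with per-pair range() calls) by a single linear pass that grows the current bucket index by index and closes it at each significant position, discarding everything if no significant value was seen.
import Mathlib
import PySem

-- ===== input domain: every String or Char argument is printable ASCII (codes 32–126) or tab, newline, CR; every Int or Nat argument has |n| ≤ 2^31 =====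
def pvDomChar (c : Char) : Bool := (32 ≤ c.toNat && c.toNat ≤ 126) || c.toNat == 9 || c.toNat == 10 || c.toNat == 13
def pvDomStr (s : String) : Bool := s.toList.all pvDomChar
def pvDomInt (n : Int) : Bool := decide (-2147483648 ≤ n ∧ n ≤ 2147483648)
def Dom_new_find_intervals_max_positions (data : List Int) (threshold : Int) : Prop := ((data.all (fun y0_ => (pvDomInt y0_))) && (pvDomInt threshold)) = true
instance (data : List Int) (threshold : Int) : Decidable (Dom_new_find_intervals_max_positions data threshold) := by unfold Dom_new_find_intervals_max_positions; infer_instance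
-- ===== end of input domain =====

-- B replaces A's two-phase build (collect significant indices, then assemble leading/between/trailing
-- range blocks) by a single pass growing and closing one bucket at a time (objective: simpler).

-- ===== PORT A =====
def new_find_intervals_max_positions (data : List Int) (threshold : Int) : List (List Int) :=
  let significant_positions : List Int :=
    ((PySem.List.enumerate data).filter (fun p => decide (threshold ≤ p.2))).map (fun p => p.1)
  -- 'if significant_positions:' — truthiness = nonempty; sig[0] / sig[-1] via pyGetD (indices provably in range)
  if significant_positions ≠ [] then
    let intervals : List (List Int) :=
      if 0 < PySem.List.pyGetD significant_positions 0 0 then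
        [PySem.List.pyRange 0 (PySem.List.pyGetD significant_positions 0 0) 1]
      else []
    let intervals :=
      (PySem.List.pyRange 0 ((significant_positions.length : Int) - 1) 1).foldl
        (fun acc i => acc ++
          [PySem.List.pyRange (PySem.List.pyGetD significant_positions i 0)
            (PySem.List.pyGetD significant_positions (i + 1) 0) 1]) intervals
    intervals ++ [PySem.List.pyRange (PySem.List.pyGetD significant_positions (-1) 0) (data.length : Int) 1]
  else []

-- ===== PORT B =====
-- loop body of Source B's single pass, named for reuse in the proofs
def pvStepB (threshold : Int) (st : List (List Int) × List Int × Bool) (p : Int × Int) :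
    List (List Int) × List Int × Bool :=
  let st := if threshold ≤ p.2 then
      ((if st.2.1 ≠ [] then st.1 ++ [st.2.1] else st.1), ([] : List Int), true)
    else st
  (st.1, st.2.1 ++ [p.1], st.2.2)

def new_find_intervals_max_positions_alt (data : List Int) (threshold : Int) : List (List Int) :=
  let st := (PySem.List.enumerate data).foldl (pvStepB threshold) ([], [], false)
  if st.2.2 = false then [] else st.1 ++ [st.2.1]

-- ===== PRECONDITION & SPEC =====
def Spec_new_find_intervals_max_positions (data : List Int) (threshold : Int) (out : List (List Int)) : Prop := out = new_find_intervals_max_positions_alt data threshold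
instance (data : List Int) (threshold : Int) (out : List (List Int)) : Decidable (Spec_new_find_intervals_max_positions data threshold out) := by unfold Spec_new_find_intervals_max_positions; infer_instance

-- ===== CLAIM (what is proved, stated in full; the proofs are below) =====
def Claim_equal_new_find_intervals_max_positions : Prop := ∀ (data : List Int) (threshold : Int), Dom_new_find_intervals_max_positions data threshold → Spec_new_find_intervals_max_positions data threshold (new_find_intervals_max_positions data threshold)

-- ===== LEMMAS AND PROOFS =====

-- significant indices of data enumerated from k
def pvSig (data : List Int) (k t : Int) : List Int :=
  ((PySem.List.enumerate data k).filter (fun p => decide (t ≤ p.2))).map (fun p => p.1)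

-- the between-pairs blocks of A
def pvBetweens : List Int → List (List Int)
  | [] => []
  | [_] => []
  | a :: b :: r => PySem.List.pyRange a b 1 :: pvBetweens (b :: r)

def pvPush (out : List (List Int)) (c : List Int) : List (List Int) :=
  if c ≠ [] then out ++ [c] else out

lemma pvSig_nil (k t : Int) : pvSig [] k t = [] := rfl

lemma pvSig_cons (x : Int) (data : List Int) (k t : Int) :
    pvSig (x :: data) k t =
      if t ≤ x then k :: pvSig data (k + 1) t else pvSig data (k + 1) t := by
  simp [pvSig, PySem.List.enumerate_cons]
  split_ifs with h <;> simp [h]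

lemma pvSig_lb (data : List Int) (k t x : Int) (h : x ∈ pvSig data k t) : k ≤ x := by
  induction data generalizing k with
  | nil => simp [pvSig_nil] at h
  | cons a d ih =>
    rw [pvSig_cons] at h
    split_ifs at h with h1
    · rcases List.mem_cons.1 h with h2 | h2
      · omega
      · have := ih (k + 1) h2; omega
    · have := ih (k + 1) h; omega

lemma pvGetLast : ∀ (rest : List Int) (s0 : Int),
    PySem.List.pyGetD (s0 :: rest) (-1) 0 = (s0 :: rest).getLast (by simp) := by
  intro rest
  induction rest with
  | nil => intro s0; simp [PySem.List.pyGetD, PySem.List.pyGet?, PySem.List.pyIdx?]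
  | cons b r ih =>
    intro s0
    have h := ih b
    simp [PySem.List.pyGetD, PySem.List.pyGet?, PySem.List.pyIdx?] at h ⊢
    exact h

lemma pvFold (data : List Int) (t : Int) :
    ∀ (k : Int) (out : List (List Int)) (cur : List Int) (seen : Bool),
    (PySem.List.enumerate data k).foldl (pvStepB t) (out, cur, seen) =
      (match pvSig data k t with
       | [] => (out, cur ++ PySem.List.pyRange k (k + (data.length : Int)) 1, seen)
       | s0 :: rest =>
          (pvPush out (cur ++ PySem.List.pyRange k s0 1) ++ pvBetweens (s0 :: rest),
           PySem.List.pyRange ((s0 :: rest).getLast (by simp)) (k + (data.length : Int)) 1,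
           true)) := by
  induction data with
  | nil => intro k out cur seen; simp [pvSig_nil, PySem.List.pyRange_one_eq_nil]
  | cons x d ih =>
    intro k out cur seen
    rw [PySem.List.enumerate_cons, List.foldl_cons, pvSig_cons]
    have hcast : (k : Int) + 1 + (d.length : Int) = k + ((d.length : Int) + 1) := by ring
    by_cases hx : t ≤ x
    · have hstep : pvStepB t (out, cur, seen) (k, x) = (pvPush out cur, [k], true) := by
        simp [pvStepB, pvPush, hx]
      rw [hstep, ih (k + 1)]
      cases hrest : pvSig d (k + 1) t with
      | nil =>
        have h2 : k :: PySem.List.pyRange (k + 1) (k + ((d.length : Int) + 1)) 1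
            = PySem.List.pyRange k (k + ((d.length : Int) + 1)) 1 :=
          (PySem.List.pyRange_one_cons (by omega)).symm
        simp [hx, pvPush, pvBetweens,
          PySem.List.pyRange_one_eq_nil (le_refl k), hcast, h2]
      | cons s1 r =>
        have hs1 : k + 1 ≤ s1 := pvSig_lb d (k + 1) t s1 (by rw [hrest]; simp)
        have h2 : PySem.List.pyRange k s1 1 = k :: PySem.List.pyRange (k + 1) s1 1 :=
          PySem.List.pyRange_one_cons (by omega)
        have h4 : PySem.List.pyRange k s1 1 ≠ [] := by rw [h2]; simp
        simp [hx, pvPush, pvBetweens,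
          PySem.List.pyRange_one_eq_nil (le_refl k), hcast, ← h2, h4]
    · have hstep : pvStepB t (out, cur, seen) (k, x) = (out, cur ++ [k], seen) := by
        simp [pvStepB, hx]
      rw [hstep, ih (k + 1)]
      cases hrest : pvSig d (k + 1) t with
      | nil =>
        have h2 : k :: PySem.List.pyRange (k + 1) (k + ((d.length : Int) + 1)) 1
            = PySem.List.pyRange k (k + ((d.length : Int) + 1)) 1 :=
          (PySem.List.pyRange_one_cons (by omega)).symm
        simp [hx, hcast, h2]
      | cons s1 r =>
        have hs1 : k + 1 ≤ s1 := pvSig_lb d (k + 1) t s1 (by rw [hrest]; simp)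
        have h2 : PySem.List.pyRange k s1 1 = k :: PySem.List.pyRange (k + 1) s1 1 :=
          PySem.List.pyRange_one_cons (by omega)
        simp [hx, pvPush, hcast, ← h2]

lemma pvMapBetweens : ∀ (r : List Int) (a : Int),
    (List.range (r.length)).map
      (fun i => PySem.List.pyRange ((a :: r).getD i 0) ((a :: r).getD (i + 1) 0) 1)
      = pvBetweens (a :: r) := by
  intro r
  induction r with
  | nil => intro a; simp [pvBetweens]
  | cons b r ih =>
    intro a
    simp only [List.length_cons]
    rw [List.range_succ_eq_map]
    simp only [List.map_cons, List.map_map]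
    rw [show (List.range r.length).map
        ((fun i => PySem.List.pyRange ((a :: b :: r).getD i 0) ((a :: b :: r).getD (i + 1) 0) 1) ∘ (· + 1))
      = (List.range r.length).map
        (fun i => PySem.List.pyRange ((b :: r).getD i 0) ((b :: r).getD (i + 1) 0) 1) from by
        apply List.map_congr_left; intro i _; rfl]
    rw [ih b]
    simp [pvBetweens]

-- A's index loop produces exactly the between-pairs blocks
lemma pvAloop (s : List Int) (hs : s ≠ []) (init : List (List Int)) :
    (PySem.List.pyRange 0 ((s.length : Int) - 1) 1).foldl
      (fun acc i => acc ++
        [PySem.List.pyRange (PySem.List.pyGetD s i 0) (PySem.List.pyGetD s (i + 1) 0) 1]) init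
      = init ++ pvBetweens s := by
  obtain ⟨a, r, rfl⟩ : ∃ a r, s = a :: r := by
    cases s with | nil => exact absurd rfl hs | cons a r => exact ⟨a, r, rfl⟩
  rw [PySem.List.foldl_append_singleton_eq_map]
  congr 1
  have hlen : ((a :: r).length : Int) - 1 = (r.length : Int) := by simp
  rw [hlen, PySem.List.pyRange_zero_natCast, List.map_map]
  rw [← pvMapBetweens r a]
  apply List.map_congr_left
  intro i _
  simp only [Function.comp]
  rw [show ((i : Int) + 1) = ((i + 1 : Nat) : Int) by push_cast; ring]
  rw [PySem.List.pyGetD_natCast, PySem.List.pyGetD_natCast]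

-- ===== VERDICT (by name: the statement is the Claim_ definition above) =====
theorem new_find_intervals_max_positions_spec : Claim_equal_new_find_intervals_max_positions := by
  intro data threshold _
  unfold Spec_new_find_intervals_max_positions
  unfold new_find_intervals_max_positions new_find_intervals_max_positions_alt
  have hsig : ((PySem.List.enumerate data).filter (fun p => decide (threshold ≤ p.2))).map
      (fun p => p.1) = pvSig data 0 threshold := rfl
  simp only [hsig]
  rw [pvFold data threshold 0 [] [] false]
  cases hs : pvSig data 0 threshold with
  | nil => simp
  | cons s0 rest =>
    have hs0 : (0 : Int) ≤ s0 := pvSig_lb data 0 threshold s0 (by rw [hs]; simp)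
    rw [pvAloop (s0 :: rest) (by simp)]
    have hpush : pvPush [] (PySem.List.pyRange 0 s0 1) =
        if 0 < s0 then [PySem.List.pyRange 0 s0 1] else [] := by
      by_cases h : 0 < s0
      · have : PySem.List.pyRange 0 s0 1 ≠ [] := by
          rw [PySem.List.pyRange_one_cons h]; simp
        simp [pvPush, this, h]
      · have : PySem.List.pyRange 0 s0 1 = [] := PySem.List.pyRange_one_eq_nil (by omega)
        simp [pvPush, this, h]
    simp [pvGetLast]
    exact hpush.symm
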